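-- pv_equiv track=rewrite | github.com/Kepter/CompetitiveProgramming | hackerrank/Implementation/fair-rations.py | fairRations
-- ===== SOURCE A (Python) =====
-- def fairRations(B):
--     count = 0
--
--     for i in range(len(B)):
--         if (B[i] % 2 != 0):
--             if (i == len(B) - 1):
--                 return "NO"
--             else:
--                 count += 2
--                 B[i] += 1
--                 B[i+1] += 1
--
--     return str(count)
-- ===== SOURCE B (Python) =====
-- def fairRations(B):
--     # Prefix-parity one-pass: feasible iff sum(B) is even; each odd prefix
--     # boundary needs exactly 2 loaves.  Return value only: does not mutate B
--     # (A mutates B in place).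
--     if sum(B) % 2 != 0:
--         return "NO"
--     count = 0
--     pref = 0
--     for x in B[:-1]:
--         pref += x
--         if pref % 2 != 0:
--             count += 2
--     return str(count)
-- ===== Notes on version B (the rewrite author's own statement) =====
-- stated objective: alternative
-- what changed: Replaces A's carry-propagating loop that rewrites B[i] and B[i+1] with a mutation-free single pass: feasibility decided up front by sum parity, count = 2 * (number of odd running prefix sums over B[:-1]); return value is identical, but B does not mutate its argument while A does.
import Mathlib
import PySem

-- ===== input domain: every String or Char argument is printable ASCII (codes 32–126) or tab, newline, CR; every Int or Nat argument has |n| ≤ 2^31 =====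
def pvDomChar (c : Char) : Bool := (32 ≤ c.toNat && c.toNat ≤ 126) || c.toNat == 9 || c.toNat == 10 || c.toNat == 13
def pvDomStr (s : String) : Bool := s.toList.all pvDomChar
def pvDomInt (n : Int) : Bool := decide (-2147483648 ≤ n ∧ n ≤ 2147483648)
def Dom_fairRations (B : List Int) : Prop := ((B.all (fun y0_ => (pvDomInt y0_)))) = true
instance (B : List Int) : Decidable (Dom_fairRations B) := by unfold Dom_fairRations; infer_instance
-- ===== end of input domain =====

-- B computes the same return value as A by a mutation-free prefix-parity pass;
-- A mutates its argument in place (Python), B does not — the claim is about the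
-- RETURN value only.

-- ===== PORT A =====
-- A's loop walks B left to right; when B[i] is odd it adds 1 to B[i] and B[i+1]
-- and moves on.  The change to B[i] is never read again, so the loop is exactly
-- this recursion on the remaining list, where the 'B[i+1] += 1' write becomes
-- the updated head of the tail; 'i == len(B) - 1' is 'the tail is empty'.
def fairRationsGo : List Int → Int → String
  | [], count => PySem.Int.toStr count
  | x :: rest, count =>
    if PySem.Int.mod x 2 ≠ 0 then
      match rest with
      | [] => "NO"
      | y :: rest' => fairRationsGo ((y + 1) :: rest') (count + 2)
    else fairRationsGo rest count
termination_by l _ => l.length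

def fairRations (B : List Int) : String := fairRationsGo B 0

-- ===== PORT B =====
def fairRationsStep (s : Int × Int) (x : Int) : Int × Int :=
  let pref := s.1 + x
  if PySem.Int.mod pref 2 ≠ 0 then (pref, s.2 + 2) else (pref, s.2)

def fairRations_alt (B : List Int) : String :=
  if PySem.Int.mod B.sum 2 ≠ 0 then "NO"
  else PySem.Int.toStr (B.dropLast.foldl fairRationsStep (0, 0)).2

-- ===== PRECONDITION & SPEC =====
def Spec_fairRations (B : List Int) (out : String) : Prop := out = fairRations_alt B
instance (B : List Int) (out : String) : Decidable (Spec_fairRations B out) := by unfold Spec_fairRations; infer_instance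

-- ===== CLAIM (what is proved, stated in full; the proofs are below) =====
def Claim_equal_fairRations : Prop := ∀ (B : List Int), Dom_fairRations B → Spec_fairRations B (fairRations B)

-- ===== LEMMAS AND PROOFS =====

-- boundary count with running prefix parity p: 2 for each non-last position
-- whose (p + prefix) sum is odd
def opcG : List Int → Int → Int
  | [], _ => 0
  | [_], _ => 0
  | x :: y :: r, p => (if PySem.Int.mod (p + x) 2 ≠ 0 then 2 else 0) + opcG (y :: r) (p + x)

lemma mod_two_emod (a : Int) : PySem.Int.mod a 2 = a % 2 :=
  PySem.Int.mod_eq_emod_of_pos (by omega)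

lemma opcG_parity : ∀ (l : List Int) (p q : Int), p % 2 = q % 2 → opcG l p = opcG l q
  | [], _, _, _ => rfl
  | [_], _, _, _ => rfl
  | x :: y :: r, p, q, h => by
    simp only [opcG, mod_two_emod]
    have h1 : (p + x) % 2 = (q + x) % 2 := by omega
    rw [h1, opcG_parity (y :: r) (p + x) (q + x) h1]

lemma goA_eq : ∀ (l : List Int) (count : Int),
    fairRationsGo l count =
      if PySem.Int.mod l.sum 2 ≠ 0 then "NO" else PySem.Int.toStr (count + opcG l 0)
  | [], count => by
    simp [fairRationsGo, opcG, PySem.Int.mod]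
  | [x], count => by
    simp [fairRationsGo, opcG]
  | x :: y :: r, count => by
    simp only [fairRationsGo, mod_two_emod]
    by_cases hx : x % 2 ≠ 0
    · rw [if_pos hx, goA_eq ((y + 1) :: r) (count + 2)]
      simp only [mod_two_emod]
      have hsum : ((y + 1) :: r).sum % 2 = (x :: y :: r).sum % 2 := by
        simp only [List.sum_cons]; omega
      have hopc : opcG ((y + 1) :: r) 0 = opcG (y :: r) x := by
        cases r with
        | nil => rfl
        | cons z r' =>
          simp only [opcG, mod_two_emod]
          have h1 : (0 + (y + 1)) % 2 = (x + y) % 2 := by omega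
          rw [h1, opcG_parity (z :: r') (0 + (y + 1)) (x + y) h1]
      have hopc2 : opcG (x :: y :: r) 0 = 2 + opcG (y :: r) x := by
        simp only [opcG, mod_two_emod]
        rw [if_pos (show (0 + x) % 2 ≠ 0 by omega),
          opcG_parity (y :: r) (0 + x) x (by omega)]
      rw [hsum, hopc, hopc2]
      split
      · rfl
      · congr 1
        ring
    · rw [if_neg hx, goA_eq (y :: r) count]
      simp only [mod_two_emod]
      rw [not_not] at hx
      have hsum : (y :: r).sum % 2 = (x :: y :: r).sum % 2 := by
        simp only [List.sum_cons]; omega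
      have hopc : opcG (x :: y :: r) 0 = opcG (y :: r) 0 := by
        simp only [opcG, mod_two_emod]
        rw [if_neg (show ¬ (0 + x) % 2 ≠ 0 by omega), zero_add]
        exact opcG_parity (y :: r) (0 + x) 0 (by omega)
      rw [hsum, hopc]
termination_by l _ => l.length

-- the alt foldl, characterised: second component accumulates opc-style count
def cntB : List Int → Int → Int
  | [], _ => 0
  | x :: r, p => (if PySem.Int.mod (p + x) 2 ≠ 0 then 2 else 0) + cntB r (p + x)

lemma foldl_step_eq : ∀ (l : List Int) (p c : Int),
    (l.foldl fairRationsStep (p, c)).2 = c + cntB l p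
  | [], p, c => by simp [cntB]
  | x :: r, p, c => by
    simp only [List.foldl_cons, fairRationsStep, cntB]
    split <;> rw [foldl_step_eq] <;> ring

lemma cntB_dropLast : ∀ (l : List Int) (p : Int), cntB l.dropLast p = opcG l p
  | [], _ => rfl
  | [_], _ => rfl
  | x :: y :: r, p => by
    simp only [List.dropLast_cons₂, cntB, opcG]
    rw [cntB_dropLast (y :: r) (p + x)]

-- ===== VERDICT (by name: the statement is the Claim_ definition above) =====
theorem fairRations_spec : Claim_equal_fairRations := by
  intro B _
  show fairRations B = fairRations_alt B
  rw [fairRations, goA_eq B 0, fairRations_alt, foldl_step_eq, cntB_dropLast]
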